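-- pv_equiv track=rewrite | github.com/Rodica24/AA_Labs | Lab3/main2.py | sieve_of_eratosthenes_2
-- ===== SOURCE A (Python) =====
-- def sieve_of_eratosthenes_2(n):
--     c = [True] * (n + 1)
--     c[1] = False
--     i = 2
--
--     while i <= n:
--         j = 2 * i
--         while j <= n:
--             c[j] = False
--             j = j + i
--         i = i + 1
--     return c
-- ===== SOURCE B (Python) =====
-- def sieve_of_eratosthenes_2(n):
--     c = [True] * (n + 1)
--     c[1] = False
--     i = 2
--     while i * i <= n:
--         if c[i]:
--             for j in range(i * i, n + 1, i):
--                 c[j] = False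
--         i += 1
--     return c
-- ===== Notes on version B (the rewrite author's own statement) =====
-- stated objective: faster
-- what changed: Standard sieve of Eratosthenes: the outer loop stops at sqrt(n), marks multiples only of numbers still unmarked (primes), and starts marking at i*i instead of 2*i; A loops i all the way to n and marks multiples of every i from 2*i.
import Mathlib
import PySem

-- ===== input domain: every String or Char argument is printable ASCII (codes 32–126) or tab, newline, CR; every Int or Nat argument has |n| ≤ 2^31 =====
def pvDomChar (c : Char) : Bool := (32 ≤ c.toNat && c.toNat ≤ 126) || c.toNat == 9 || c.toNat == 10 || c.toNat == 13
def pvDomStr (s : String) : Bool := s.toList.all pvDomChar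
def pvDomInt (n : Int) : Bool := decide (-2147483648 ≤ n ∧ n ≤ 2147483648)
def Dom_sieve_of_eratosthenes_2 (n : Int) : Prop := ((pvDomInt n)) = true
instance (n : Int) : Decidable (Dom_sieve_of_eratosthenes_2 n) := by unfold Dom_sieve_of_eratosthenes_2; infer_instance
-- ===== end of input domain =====

-- B replaces A's full-range multiple marking by the standard sieve of Eratosthenes
-- (outer loop only to sqrt(n), mark only from still-unmarked i, start marking at i*i).

-- ===== PORT A =====
-- inner while loop: 'while j <= n: c[j] = False; j = j + i' (fuel only makes the loop total; it never runs out on Pre_)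
def sieveA_inner (fuel : Nat) (n i j : Int) (c : List Bool) : List Bool :=
  match fuel with
  | 0 => c
  | f+1 => if j ≤ n then sieveA_inner f n i (j + i) (PySem.List.pySetD c j false) else c

-- outer while loop: 'while i <= n: j = 2*i; <inner>; i = i + 1'
def sieveA_outer (fuel : Nat) (n i : Int) (c : List Bool) : List Bool :=
  match fuel with
  | 0 => c
  | f+1 => if i ≤ n then sieveA_outer f n (i + 1) (sieveA_inner (n + 1).toNat n i (2 * i) c) else c

def sieve_of_eratosthenes_2 (n : Int) : List Bool :=
  sieveA_outer (n + 1).toNat n 2 (PySem.List.pySetD (List.replicate (n + 1).toNat true) 1 false)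

-- ===== PORT B =====
-- 'while i * i <= n: if c[i]: for j in range(i*i, n+1, i): c[j] = False; i += 1'
def sieveB_loop (fuel : Nat) (n i : Int) (c : List Bool) : List Bool :=
  match fuel with
  | 0 => c
  | f+1 =>
    if i * i ≤ n then
      sieveB_loop f n (i + 1)
        (if PySem.List.pyGetD c i false then
          (PySem.List.pyRange (i * i) (n + 1) i).foldl (fun c j => PySem.List.pySetD c j false) c
        else c)
    else c

def sieve_of_eratosthenes_2_alt (n : Int) : List Bool :=
  sieveB_loop (n + 1).toNat n 2 (PySem.List.pySetD (List.replicate (n + 1).toNat true) 1 false)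

-- ===== PRECONDITION & SPEC =====
-- Python A raises IndexError at 'c[1] = False' exactly when n < 1 ([True]*(n+1) then has length < 2).
def Pre_sieve_of_eratosthenes_2 (n : Int) : Prop := 1 ≤ n
instance (n : Int) : Decidable (Pre_sieve_of_eratosthenes_2 n) := by unfold Pre_sieve_of_eratosthenes_2; infer_instance
def pvWitness_sieve_of_eratosthenes_2 : Int := (10)

def Spec_sieve_of_eratosthenes_2 (n : Int) (out : List Bool) : Prop := out = sieve_of_eratosthenes_2_alt n
instance (n : Int) (out : List Bool) : Decidable (Spec_sieve_of_eratosthenes_2 n out) := by unfold Spec_sieve_of_eratosthenes_2; infer_instance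

-- ===== CLAIM (what is proved, stated in full; the proofs are below) =====
def Claim_equal_sieve_of_eratosthenes_2 : Prop := ∀ (n : Int), Dom_sieve_of_eratosthenes_2 n → Pre_sieve_of_eratosthenes_2 n → Spec_sieve_of_eratosthenes_2 n (sieve_of_eratosthenes_2 n)

-- ===== LEMMAS AND PROOFS =====

-- "k has been marked by A after processing all outer values d < i": k = d*m with 2 <= d < i, 2 <= m
def markedA (i : Int) (k : Nat) : Prop := ∃ d m : Int, 2 ≤ d ∧ d < i ∧ 2 ≤ m ∧ d * m = (k : Int)
-- "k has been marked by B after processing all outer values p < i": a prime p < i divides k with p*p <= k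
def markedB (i : Int) (k : Nat) : Prop := ∃ p : Nat, (p : Int) < i ∧ Nat.Prime p ∧ p ∣ k ∧ (p : Int) * p ≤ (k : Int)

lemma length_foldl_set (js : List Int) (c : List Bool) :
    (js.foldl (fun c j => PySem.List.pySetD c j false) c).length = c.length := by
  induction js generalizing c with
  | nil => rfl
  | cons j js ih => simp only [List.foldl]; rw [ih, PySem.List.length_pySetD]

lemma set_getD_false (c : List Bool) (m k : Nat) :
    (c.set m false).getD k false = if m = k then false else c.getD k false := by
  rw [List.getD_eq_getElem?_getD, List.getElem?_set]
  split_ifs with h1 h2 <;> simp [List.getD_eq_getElem?_getD]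

lemma getD_foldl_set (js : List Int) (hjs : ∀ j ∈ js, 0 ≤ j) (c : List Bool) (k : Nat) :
    (js.foldl (fun c j => PySem.List.pySetD c j false) c).getD k false =
      if (∃ j ∈ js, j.toNat = k) then false else c.getD k false := by
  induction js generalizing c with
  | nil => simp
  | cons j js ih =>
    simp only [List.foldl]
    rw [PySem.List.pySetD_of_nonneg c false (hjs j (by simp)),
        ih (fun j' hj' => hjs j' (by simp [hj']))]
    by_cases h1 : ∃ j' ∈ js, j'.toNat = k
    · simp [h1]
    · rw [set_getD_false]
      by_cases h2 : j.toNat = k <;> simp [h1, h2]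

lemma pyRange_pos_nil (n i j : Int) (hi : 0 < i) (h : n < j) :
    PySem.List.pyRange j (n + 1) i = [] := by
  rw [PySem.List.pyRange_of_pos _ _ hi, if_neg (by omega)]
  simp

lemma pyRange_pos_cons (n i j : Int) (hi : 0 < i) (h : j ≤ n) :
    PySem.List.pyRange j (n + 1) i = j :: PySem.List.pyRange (j + i) (n + 1) i := by
  rw [PySem.List.pyRange_of_pos _ _ hi, PySem.List.pyRange_of_pos _ _ hi]
  have hq0 : 0 ≤ (n - j) / i := Int.ediv_nonneg (by omega) (by omega)
  have hM : (n + 1 - j + i - 1) / i = (n - j) / i + 1 := by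
    have he : n + 1 - j + i - 1 = (n - j) + 1 * i := by ring
    rw [he, Int.add_mul_ediv_right _ _ (by omega : i ≠ 0)]
  rw [if_pos (by omega : j < n + 1), hM]
  have htn : ((n - j) / i + 1).toNat = ((n - j) / i).toNat + 1 := by omega
  rw [htn, List.range_succ_eq_map, List.map_cons, List.map_map]
  by_cases hcase : j + i ≤ n
  · have hM' : (n + 1 - (j + i) + i - 1) / i = (n - j) / i := by
      congr 1; ring
    rw [if_pos (by omega), hM']
    refine List.cons_eq_cons.mpr ⟨by simp, ?_⟩
    apply List.map_congr_left
    intro a _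
    simp only [Function.comp]
    push_cast
    ring
  · rw [if_neg (by omega)]
    have hq1 : (n - j) / i = 0 := Int.ediv_eq_zero_of_lt (by omega) (by omega)
    rw [hq1]
    simp

lemma sieveA_inner_eq (f : Nat) (n i j : Int) (hi : 0 < i) (hf : (n + 1 - j).toNat ≤ f) (c : List Bool) :
    sieveA_inner f n i j c =
      (PySem.List.pyRange j (n + 1) i).foldl (fun c j => PySem.List.pySetD c j false) c := by
  induction f generalizing j c with
  | zero =>
    rw [pyRange_pos_nil n i j hi (by omega)]
    rfl
  | succ f ih =>
    simp only [sieveA_inner]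
    by_cases h : j ≤ n
    · rw [if_pos h, pyRange_pos_cons n i j hi h, ih (j + i) (by omega)]
      rfl
    · rw [if_neg h, pyRange_pos_nil n i j hi (by omega)]
      rfl

-- initial array: [True]*(n+1) with c[1] = False
lemma init_getD (n : Int) (hn : 1 ≤ n) (k : Nat) :
    (PySem.List.pySetD (List.replicate (n + 1).toNat true) 1 false).getD k false = true ↔
      (k ≤ n.toNat ∧ k ≠ 1) := by
  rw [PySem.List.pySetD_of_nonneg _ _ (by omega : (0:Int) ≤ 1), set_getD_false,
      List.getD_eq_getElem?_getD, List.getElem?_replicate]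
  have h1 : (1 : Int).toNat = 1 := rfl
  rw [h1]
  split_ifs with h2 h3 <;> simp <;> omega

lemma sieveA_inner_length (f : Nat) (n i j : Int) (c : List Bool) :
    (sieveA_inner f n i j c).length = c.length := by
  induction f generalizing j c with
  | zero => rfl
  | succ f ih =>
    simp only [sieveA_inner]
    split_ifs with h
    · rw [ih, PySem.List.length_pySetD]
    · rfl

lemma sieveA_outer_length (f : Nat) (n i : Int) (c : List Bool) :
    (sieveA_outer f n i c).length = c.length := by
  induction f generalizing i c with
  | zero => rfl
  | succ f ih =>
    simp only [sieveA_outer]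
    split_ifs with h
    · rw [ih, sieveA_inner_length]
    · rfl

lemma sieveB_loop_length (f : Nat) (n i : Int) (c : List Bool) :
    (sieveB_loop f n i c).length = c.length := by
  induction f generalizing i c with
  | zero => rfl
  | succ f ih =>
    simp only [sieveB_loop]
    split_ifs with h h2
    · rw [ih, length_foldl_set]
    · rw [ih]
    · rfl

-- A's marking range at outer value i hits exactly the proper multiples i*m (m >= 2) up to n
lemma memA_iff (n i : Int) (hi : 2 ≤ i) (k : Nat) :
    (∃ x ∈ PySem.List.pyRange (2 * i) (n + 1) i, x.toNat = k) ↔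
      ((k : Int) ≤ n ∧ ∃ m : Int, 2 ≤ m ∧ i * m = (k : Int)) := by
  constructor
  · rintro ⟨x, hx, rfl⟩
    rw [PySem.List.mem_pyRange_iff_of_pos (by omega)] at hx
    obtain ⟨h1, h2, t, ht⟩ := hx
    have hx0 : 0 ≤ x := by omega
    have hxk : (x.toNat : Int) = x := Int.toNat_of_nonneg hx0
    have hit : i * 0 ≤ i * t := by linarith
    have ht0 : (0 : Int) ≤ t := le_of_mul_le_mul_left hit (by omega)
    refine ⟨by omega, t + 2, by omega, ?_⟩
    rw [hxk, mul_add]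
    linarith
  · rintro ⟨hkn, m, hm, hmk⟩
    have h2i : i * 2 ≤ i * m := mul_le_mul_of_nonneg_left hm (by omega)
    refine ⟨(k : Int), ?_, Int.toNat_natCast k⟩
    rw [PySem.List.mem_pyRange_iff_of_pos (by omega)]
    refine ⟨by linarith, by omega, m - 2, by rw [mul_sub]; linarith⟩

-- B's marking range at outer value i hits exactly the multiples of i in [i*i, n]
lemma memB_iff (n i : Int) (hi : 2 ≤ i) (k : Nat) :
    (∃ x ∈ PySem.List.pyRange (i * i) (n + 1) i, x.toNat = k) ↔
      ((k : Int) ≤ n ∧ i.toNat ∣ k ∧ i * i ≤ (k : Int)) := by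
  have hic : (i.toNat : Int) = i := Int.toNat_of_nonneg (by omega)
  have hii0 : (0 : Int) ≤ i * i := by positivity
  constructor
  · rintro ⟨x, hx, rfl⟩
    rw [PySem.List.mem_pyRange_iff_of_pos (by omega)] at hx
    obtain ⟨h1, h2, t, ht⟩ := hx
    have hx0 : 0 ≤ x := by linarith
    have hxk : (x.toNat : Int) = x := Int.toNat_of_nonneg hx0
    refine ⟨by omega, ?_, by rw [hxk]; exact h1⟩
    rw [← Int.natCast_dvd_natCast, hic, hxk]
    exact ⟨i + t, by rw [mul_add]; linarith⟩
  · rintro ⟨hkn, hdvd, hik⟩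
    refine ⟨(k : Int), ?_, Int.toNat_natCast k⟩
    rw [PySem.List.mem_pyRange_iff_of_pos (by omega)]
    rw [← Int.natCast_dvd_natCast, hic] at hdvd
    obtain ⟨u, hu⟩ := hdvd
    refine ⟨hik, by omega, u - i, by rw [mul_sub]; linarith⟩

lemma markedA_step (n i : Int) (hi : 2 ≤ i) (k : Nat) :
    markedA (i + 1) k ↔ markedA i k ∨ (∃ m : Int, 2 ≤ m ∧ i * m = (k : Int)) := by
  constructor
  · rintro ⟨d, m, h2, hdi, hm, hdm⟩
    by_cases hd : d < i
    · exact Or.inl ⟨d, m, h2, hd, hm, hdm⟩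
    · have : d = i := by omega
      subst this
      exact Or.inr ⟨m, hm, hdm⟩
  · rintro (⟨d, m, h2, hdi, hm, hdm⟩ | ⟨m, hm, hdm⟩)
    · exact ⟨d, m, h2, by omega, hm, hdm⟩
    · exact ⟨i, m, hi, by omega, hm, hdm⟩

-- once i is past n, bounded and unbounded A-marking agree for in-range k
lemma markedA_top (n i : Int) (hn : 1 ≤ n) (hni : n + 1 ≤ i) (k : Nat) (hk : k ≤ n.toNat) :
    markedA i k ↔ markedA (n + 1) k := by
  constructor
  · rintro ⟨d, m, hd2, hdi, hm, hdm⟩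
    have h2d : d * 2 ≤ d * m := mul_le_mul_of_nonneg_left hm (by omega)
    have hkn : (k : Int) ≤ n := by omega
    exact ⟨d, m, hd2, by linarith, hm, hdm⟩
  · rintro ⟨d, m, hd2, hdn, hm, hdm⟩
    exact ⟨d, m, hd2, by omega, hm, hdm⟩

-- A's invariant propagates through the outer loop
lemma sieveA_outer_char (f : Nat) (n i : Int) (c : List Bool) (hn : 1 ≤ n) (hi : 2 ≤ i)
    (hf : (n + 1 - i).toNat ≤ f)
    (hinv : ∀ k : Nat, c.getD k false = true ↔ (k ≤ n.toNat ∧ k ≠ 1 ∧ ¬ markedA i k)) :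
    ∀ k : Nat, (sieveA_outer f n i c).getD k false = true ↔
      (k ≤ n.toNat ∧ k ≠ 1 ∧ ¬ markedA (n + 1) k) := by
  induction f generalizing i c with
  | zero =>
    intro k
    simp only [sieveA_outer]
    rw [hinv k]
    constructor
    · rintro ⟨h1, h2, h3⟩
      exact ⟨h1, h2, fun hm => h3 ((markedA_top n i hn (by omega) k h1).mpr hm)⟩
    · rintro ⟨h1, h2, h3⟩
      exact ⟨h1, h2, fun hm => h3 ((markedA_top n i hn (by omega) k h1).mp hm)⟩
  | succ f ih =>
    intro k
    simp only [sieveA_outer]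
    by_cases h : i ≤ n
    · rw [if_pos h]
      rw [sieveA_inner_eq _ n i (2 * i) (by omega) (by omega) c]
      refine ih (i + 1) _ (by omega) (by omega) ?_ k
      intro k'
      rw [getD_foldl_set _ ?hnn c k']
      case hnn =>
        intro x hx
        rw [PySem.List.mem_pyRange_iff_of_pos (by omega)] at hx
        omega
      by_cases hP : ∃ x ∈ PySem.List.pyRange (2 * i) (n + 1) i, x.toNat = k'
      · rw [if_pos hP]
        rw [memA_iff n i hi k'] at hP
        simp only [Bool.false_eq_true, false_iff]
        rw [markedA_step n i hi k']
        exact fun ⟨_, _, h3⟩ => h3 (Or.inr hP.2)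
      · rw [if_neg hP, hinv k']
        rw [memA_iff n i hi k'] at hP
        rw [markedA_step n i hi k']
        constructor
        · rintro ⟨h1, h2, h3⟩
          refine ⟨h1, h2, ?_⟩
          rintro (hA | hB)
          · exact h3 hA
          · exact hP ⟨by omega, hB⟩
        · rintro ⟨h1, h2, h3⟩
          exact ⟨h1, h2, fun hA => h3 (Or.inl hA)⟩
    · rw [if_neg h]
      rw [hinv k]
      constructor
      · rintro ⟨h1, h2, h3⟩
        exact ⟨h1, h2, fun hm => h3 ((markedA_top n i hn (by omega) k h1).mpr hm)⟩
      · rintro ⟨h1, h2, h3⟩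
        exact ⟨h1, h2, fun hm => h3 ((markedA_top n i hn (by omega) k h1).mp hm)⟩

-- once i*i > n, B's invariant already says "unmarked = 0 or prime"
lemma sieveB_exit (n i : Int) (c : List Bool) (hn : 1 ≤ n) (hi : 2 ≤ i) (hii : n < i * i)
    (hinv : ∀ k : Nat, c.getD k false = true ↔ (k ≤ n.toNat ∧ k ≠ 1 ∧ ¬ markedB i k)) :
    ∀ k : Nat, c.getD k false = true ↔ (k ≤ n.toNat ∧ k ≠ 1 ∧ (k = 0 ∨ Nat.Prime k)) := by
  intro k
  rw [hinv k]
  refine and_congr_right fun hk => and_congr_right fun hk1 => ?_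
  by_cases hk0 : k = 0
  · subst hk0
    constructor
    · intro _; exact Or.inl rfl
    · intro _
      rintro ⟨p, hpi, hp, hpd, hpp⟩
      have h2 : (2:Int) ≤ (p:Int) := by exact_mod_cast hp.two_le
      have h4 : (2:Int) * 2 ≤ (p:Int) * p := mul_le_mul h2 h2 (by omega) (by omega)
      have hz : ((0:Nat):Int) = 0 := rfl
      rw [hz] at hpp
      linarith
  · by_cases hkp : Nat.Prime k
    · constructor
      · intro _; exact Or.inr hkp
      · intro _
        rintro ⟨p, hpi, hp, hpd, hpp⟩
        rcases (Nat.Prime.eq_one_or_self_of_dvd hkp p hpd) with h1 | h1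
        · exact hp.one_lt.ne' h1
        · subst h1
          have h2 : (2:Int) ≤ (p:Int) := by exact_mod_cast hp.two_le
          have hx : (p:Int) * 2 ≤ (p:Int) * p := mul_le_mul_of_nonneg_left h2 (by linarith)
          linarith
    · constructor
      · intro hnm
        exfalso
        apply hnm
        have hk2 : 2 ≤ k := by omega
        have hsq : k.minFac * k.minFac ≤ k := by
          have := Nat.minFac_sq_le_self (by omega) hkp
          simpa [pow_two] using this
        refine ⟨k.minFac, ?_, Nat.minFac_prime (by omega), Nat.minFac_dvd k, by exact_mod_cast hsq⟩
        -- minFac k < i since (minFac k)^2 <= k <= n < i*i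
        by_contra hc
        push_neg at hc
        have : i * i ≤ (k.minFac : Int) * k.minFac :=
          mul_le_mul hc hc (by omega) (by exact_mod_cast Nat.zero_le _)
        have hkk : (k.minFac : Int) * k.minFac ≤ (k : Int) := by exact_mod_cast hsq
        have hkn : (k : Int) ≤ n := by omega
        linarith
      · rintro (h | h)
        · exact absurd h hk0
        · exact absurd h hkp

-- A's marking predicate at exit is exactly "neither 0 nor prime" on in-range k != 1
lemma markedA_final_iff (n : Int) (hn : 1 ≤ n) (k : Nat) (hk : k ≤ n.toNat) (hk1 : k ≠ 1) :
    markedA (n + 1) k ↔ ¬ (k = 0 ∨ Nat.Prime k) := by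
  constructor
  · rintro ⟨d, m, hd, hdi, hm, hdm⟩
    have hdk : d * 2 ≤ d * m := mul_le_mul_of_nonneg_left hm (by omega)
    have h4 : (2:Int) * 2 ≤ d * m := mul_le_mul hd hm (by omega) (by omega)
    have hk4 : (4 : Int) ≤ (k : Int) := by linarith
    rintro (h0 | hp)
    · subst h0
      norm_num at hk4
    · have hdnat : (d.toNat : Int) = d := Int.toNat_of_nonneg (by omega)
      have hmnat : (m.toNat : Int) = m := Int.toNat_of_nonneg (by omega)
      have hdvd : d.toNat ∣ k := by
        refine ⟨m.toNat, ?_⟩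
        have hcast : ((d.toNat * m.toNat : Nat) : Int) = (k : Int) := by
          push_cast
          rw [hdnat, hmnat]
          exact hdm
        exact_mod_cast hcast.symm
      rcases hp.eq_one_or_self_of_dvd _ hdvd with h1 | h1
      · omega
      · have hdltk : d < (k : Int) := by linarith
        omega
  · intro h
    have h0 : k ≠ 0 := fun hh => h (Or.inl hh)
    have hp : ¬ Nat.Prime k := fun hh => h (Or.inr hh)
    have hk2 : 2 ≤ k := by omega
    have hdp := Nat.minFac_prime (show k ≠ 1 from hk1)
    obtain ⟨m, hm⟩ := Nat.minFac_dvd k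
    have hm2 : 2 ≤ m := by
      rcases Nat.lt_or_ge m 2 with hlt | hge
      · exfalso
        interval_cases m
        · omega
        · exact hp (by rw [hm, Nat.mul_one]; exact hdp)
      · exact hge
    have hfle : k.minFac ≤ k := Nat.le_of_dvd (by omega) (Nat.minFac_dvd k)
    refine ⟨k.minFac, m, by exact_mod_cast hdp.two_le, by omega, by exact_mod_cast hm2,
      by exact_mod_cast hm.symm⟩

-- "c[i] is still True" decides primality of i during B's loop
lemma notMarkedB_iff_prime (i : Int) (hi : 2 ≤ i) :
    (¬ markedB i i.toNat) ↔ Nat.Prime i.toNat := by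
  have hic : (i.toNat : Int) = i := Int.toNat_of_nonneg (by omega)
  have hi2 : 2 ≤ i.toNat := by omega
  constructor
  · intro hnm
    by_contra hnp
    apply hnm
    have hsq : i.toNat.minFac * i.toNat.minFac ≤ i.toNat := by
      have := Nat.minFac_sq_le_self (by omega) hnp
      simpa [pow_two] using this
    have hdp := Nat.minFac_prime (show i.toNat ≠ 1 by omega)
    refine ⟨i.toNat.minFac, ?_, hdp, Nat.minFac_dvd _, by exact_mod_cast hsq⟩
    have hle : i.toNat.minFac ≤ i.toNat := Nat.le_of_dvd (by omega) (Nat.minFac_dvd _)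
    have hne : i.toNat.minFac ≠ i.toNat := fun hh => hnp (hh ▸ hdp)
    omega
  · rintro hp ⟨p, hpi, hpp, hpd, _⟩
    rcases hp.eq_one_or_self_of_dvd p hpd with h1 | h1
    · exact hpp.one_lt.ne' h1
    · subst h1; omega

lemma markedB_step_prime (i : Int) (hi : 2 ≤ i) (hp : Nat.Prime i.toNat) (k : Nat) :
    markedB (i + 1) k ↔ markedB i k ∨ (i.toNat ∣ k ∧ i * i ≤ (k : Int)) := by
  have hic : (i.toNat : Int) = i := Int.toNat_of_nonneg (by omega)
  constructor
  · rintro ⟨p, hpi, hpp, hpd, hppk⟩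
    by_cases hpi' : (p : Int) < i
    · exact Or.inl ⟨p, hpi', hpp, hpd, hppk⟩
    · have : p = i.toNat := by omega
      subst this
      refine Or.inr ⟨hpd, ?_⟩
      rw [← hic]
      exact hppk
  · rintro (⟨p, hpi, hpp, hpd, hppk⟩ | ⟨hpd, hik⟩)
    · exact ⟨p, by omega, hpp, hpd, hppk⟩
    · refine ⟨i.toNat, by omega, hp, hpd, ?_⟩
      rw [hic]
      exact hik

lemma markedB_step_notprime (i : Int) (hi : 2 ≤ i) (hp : ¬ Nat.Prime i.toNat) (k : Nat) :
    markedB (i + 1) k ↔ markedB i k := by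
  constructor
  · rintro ⟨p, hpi, hpp, hpd, hppk⟩
    by_cases hpi' : (p : Int) < i
    · exact ⟨p, hpi', hpp, hpd, hppk⟩
    · have : p = i.toNat := by omega
      subst this
      exact absurd hpp hp
  · rintro ⟨p, hpi, hpp, hpd, hppk⟩
    exact ⟨p, by omega, hpp, hpd, hppk⟩

-- B's invariant propagates through the loop
lemma sieveB_loop_char (f : Nat) (n i : Int) (c : List Bool) (hn : 1 ≤ n) (hi : 2 ≤ i)
    (hf : (n + 1 - i).toNat ≤ f)
    (hinv : ∀ k : Nat, c.getD k false = true ↔ (k ≤ n.toNat ∧ k ≠ 1 ∧ ¬ markedB i k)) :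
    ∀ k : Nat, (sieveB_loop f n i c).getD k false = true ↔
      (k ≤ n.toNat ∧ k ≠ 1 ∧ (k = 0 ∨ Nat.Prime k)) := by
  induction f generalizing i c with
  | zero =>
    have h2 : i * 1 ≤ i * i := mul_le_mul_of_nonneg_left (by omega) (by omega)
    have hii : n < i * i := by
      have : n + 1 ≤ i := by omega
      linarith
    exact sieveB_exit n i c hn hi hii hinv
  | succ f ih =>
    intro k
    simp only [sieveB_loop]
    by_cases hii : i * i ≤ n
    · rw [if_pos hii]
      have h2 : i * 1 ≤ i * i := mul_le_mul_of_nonneg_left (by omega) (by omega)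
      have hin : i ≤ n := by linarith
      have hic : (i.toNat : Int) = i := Int.toNat_of_nonneg (by omega)
      have hci : PySem.List.pyGetD c i false = c.getD i.toNat false :=
        PySem.List.pyGetD_of_nonneg c false (by omega)
      by_cases hprime : Nat.Prime i.toNat
      · -- c[i] is True: mark multiples of i from i*i
        have hcit : c.getD i.toNat false = true := by
          rw [hinv i.toNat]
          exact ⟨by omega, by omega, (notMarkedB_iff_prime i hi).mpr hprime⟩
        rw [hci, hcit, if_pos rfl]
        refine ih (i + 1) _ (by omega) (by omega) ?_ k
        intro k'
        rw [getD_foldl_set _ ?hnn c k']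
        case hnn =>
          intro x hx
          rw [PySem.List.mem_pyRange_iff_of_pos (by omega)] at hx
          have hii0 : (0:Int) ≤ i * i := by positivity
          linarith [hx.1]
        by_cases hP : ∃ x ∈ PySem.List.pyRange (i * i) (n + 1) i, x.toNat = k'
        · rw [if_pos hP]
          rw [memB_iff n i hi k'] at hP
          simp only [Bool.false_eq_true, false_iff]
          rw [markedB_step_prime i hi hprime k']
          exact fun ⟨_, _, h3⟩ => h3 (Or.inr ⟨hP.2.1, hP.2.2⟩)
        · rw [if_neg hP, hinv k']
          rw [memB_iff n i hi k'] at hP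
          rw [markedB_step_prime i hi hprime k']
          constructor
          · rintro ⟨h1', h2', h3'⟩
            refine ⟨h1', h2', ?_⟩
            rintro (hB | hN)
            · exact h3' hB
            · exact hP ⟨by omega, hN.1, hN.2⟩
          · rintro ⟨h1', h2', h3'⟩
            exact ⟨h1', h2', fun hB => h3' (Or.inl hB)⟩
      · -- c[i] is False: nothing marked this round
        have hcit : c.getD i.toNat false = false := by
          cases hb : c.getD i.toNat false
          · rfl
          · exfalso
            rw [hinv i.toNat] at hb
            exact hprime ((notMarkedB_iff_prime i hi).mp hb.2.2)
        rw [hci, hcit]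
        simp only [Bool.false_eq_true, if_false]
        refine ih (i + 1) _ (by omega) (by omega) ?_ k
        intro k'
        rw [hinv k', markedB_step_notprime i hi hprime k']
    · rw [if_neg hii]
      exact sieveB_exit n i c hn hi (by omega) hinv k

-- ===== VERDICT (by name: the statement is the Claim_ definition above) =====
theorem sieve_of_eratosthenes_2_spec : Claim_equal_sieve_of_eratosthenes_2 := by
  intro n _ hn
  unfold Spec_sieve_of_eratosthenes_2 sieve_of_eratosthenes_2 sieve_of_eratosthenes_2_alt
  set c0 := PySem.List.pySetD (List.replicate (n + 1).toNat true) 1 false with hc0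
  have hinvA : ∀ k : Nat, c0.getD k false = true ↔ (k ≤ n.toNat ∧ k ≠ 1 ∧ ¬ markedA 2 k) := by
    intro k
    rw [init_getD n hn k]
    have hnm : ¬ markedA 2 k := by rintro ⟨d, m, h1, h2, _, _⟩; omega
    tauto
  have hinvB : ∀ k : Nat, c0.getD k false = true ↔ (k ≤ n.toNat ∧ k ≠ 1 ∧ ¬ markedB 2 k) := by
    intro k
    rw [init_getD n hn k]
    have hnm : ¬ markedB 2 k := by
      rintro ⟨p, h1, hp, _, _⟩
      have := hp.two_le
      omega
    tauto
  have hA := sieveA_outer_char (n + 1).toNat n 2 c0 hn (by omega) (by omega) hinvA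
  have hB := sieveB_loop_char (n + 1).toNat n 2 c0 hn (by omega) (by omega) hinvB
  have hlen : (sieveA_outer (n + 1).toNat n 2 c0).length = (sieveB_loop (n + 1).toNat n 2 c0).length := by
    rw [sieveA_outer_length, sieveB_loop_length]
  apply List.ext_getElem hlen
  intro k h1 h2
  have hgd : ∀ (l : List Bool) (h : k < l.length), l[k] = l.getD k false := by
    intro l h
    rw [List.getD_eq_getElem?_getD, List.getElem?_eq_getElem h]
    rfl
  rw [hgd _ h1, hgd _ h2]
  have hAk := hA k
  have hBk := hB k
  rcases Bool.eq_false_or_eq_true ((sieveA_outer (n + 1).toNat n 2 c0).getD k false) with hav | hav <;>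
    rcases Bool.eq_false_or_eq_true ((sieveB_loop (n + 1).toNat n 2 c0).getD k false) with hbv | hbv
  · rw [hav, hbv]
  · -- A true, B false (or the other mixed case): derive a contradiction
    rw [hav] at hAk
    obtain ⟨hk1, hk2, hk3⟩ := hAk.mp rfl
    have hBt : (sieveB_loop (n + 1).toNat n 2 c0).getD k false = true := by
      rw [hBk]
      refine ⟨hk1, hk2, ?_⟩
      by_contra hc
      exact hk3 ((markedA_final_iff n hn k hk1 hk2).mpr hc)
    rw [hbv] at hBt
    exact absurd hBt (by simp)
  · rw [hbv] at hBk
    obtain ⟨hk1, hk2, hk3⟩ := hBk.mp rfl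
    have hAt : (sieveA_outer (n + 1).toNat n 2 c0).getD k false = true := by
      rw [hAk]
      exact ⟨hk1, hk2, fun hm => ((markedA_final_iff n hn k hk1 hk2).mp hm) hk3⟩
    rw [hav] at hAt
    exact absurd hAt (by simp)
  · rw [hav, hbv]
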